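-- pv_equiv track=rewrite | github.com/dc-diogo/intro-to-python | 2. Strings/comparando_strings.py | menor_string
-- ===== SOURCE A (Python) =====
-- def menor_string(lista):
--     i = 0
--     aux = lista[0].lower().strip()
--     while i < len(lista):
--         lista[i] = lista[i].lower()
--         lista[i] = lista[i].strip()
--         if aux > lista[i]:
--             aux = lista[i]
--         i = i + 1
--
--     return aux
-- ===== SOURCE B (Python) =====
-- def menor_string(lista):
--     for i in range(len(lista)):
--         lista[i] = lista[i].lower().strip()
--     return sorted(lista)[0]
-- ===== Notes on version B (the rewrite author's own statement) =====
-- stated objective: idiomatic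
-- what changed: B replaces A's running-minimum while loop by normalizing each element in place and returning sorted(lista)[0] (sort-then-index instead of a linear min scan).
import Mathlib
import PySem

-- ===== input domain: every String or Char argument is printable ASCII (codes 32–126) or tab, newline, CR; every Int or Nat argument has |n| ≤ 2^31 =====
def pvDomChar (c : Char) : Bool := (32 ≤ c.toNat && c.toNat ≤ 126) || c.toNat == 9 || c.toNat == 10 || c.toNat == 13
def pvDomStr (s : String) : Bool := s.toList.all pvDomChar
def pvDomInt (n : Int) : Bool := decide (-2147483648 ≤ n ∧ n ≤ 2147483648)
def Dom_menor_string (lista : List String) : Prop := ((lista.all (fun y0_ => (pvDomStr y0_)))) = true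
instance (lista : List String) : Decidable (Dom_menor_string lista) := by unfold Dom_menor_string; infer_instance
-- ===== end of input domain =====

-- B keeps A's in-place normalization but returns sorted(lista)[0] instead of a running-min scan
-- (idiomatic; return value only — both Pythons mutate `lista` identically).

-- ===== PORT A =====
-- the while loop: each element is normalized, then the running minimum `aux` is updated
def menorLoopA : List String → String → String
  | [], aux => aux
  | s :: rest, aux =>
      let t := PySem.Str.strip (PySem.Str.lower s)
      menorLoopA rest (if aux > t then t else aux)

def menor_string (lista : List String) : String :=
  match lista with
  | [] => ""   -- Python raises IndexError here; excluded by Pre_menor_string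
  | x :: _ => menorLoopA lista (PySem.Str.strip (PySem.Str.lower x))

-- ===== PORT B =====
def menor_string_alt (lista : List String) : String :=
  let norm := lista.map (fun s => PySem.Str.strip (PySem.Str.lower s))
  PySem.List.pyGetD (PySem.List.sorted norm (fun x => x) false) 0 ""
  -- sorted(lista)[0]; on [] Python raises IndexError, excluded by Pre_menor_string

-- ===== PRECONDITION & SPEC =====
-- A raises IndexError on the empty list (lista[0]); B raises there too (sorted([])[0]).
def Pre_menor_string (lista : List String) : Prop := lista ≠ []
instance (lista : List String) : Decidable (Pre_menor_string lista) := by unfold Pre_menor_string; infer_instance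
def pvWitness_menor_string : List String := ["  B ", "a"]

def Spec_menor_string (lista : List String) (out : String) : Prop := out = menor_string_alt lista
instance (lista : List String) (out : String) : Decidable (Spec_menor_string lista out) := by unfold Spec_menor_string; infer_instance

-- ===== CLAIM (what is proved, stated in full; the proofs are below) =====
def Claim_equal_menor_string : Prop := ∀ (lista : List String), Dom_menor_string lista → Pre_menor_string lista → Spec_menor_string lista (menor_string lista)

-- ===== LEMMAS AND PROOFS =====

-- A's loop is the running minimum of the normalized elements
theorem menorLoopA_eq_foldl (l : List String) (aux : String) :
    menorLoopA l aux = (l.map (fun s => PySem.Str.strip (PySem.Str.lower s))).foldl min aux := by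
  induction l generalizing aux with
  | nil => rfl
  | cons s rest ih =>
      simp only [menorLoopA, List.map, List.foldl, ih]
      congr 1
      by_cases h : PySem.Str.strip (PySem.Str.lower s) < aux
      · rw [if_pos h, min_eq_right h.le]
      · rw [if_neg h, min_eq_left (not_lt.mp h)]

-- the head of a sorted nonempty list equals the running minimum
theorem head_sorted_eq_foldl_min (x : String) (ts : List String) :
    PySem.List.pyGetD (PySem.List.sorted (x :: ts) (fun y => y) false) 0 "" = ts.foldl min x := by
  have hm : PySem.List.min? (x :: ts) (fun y => y) = some (ts.foldl min x) :=
    PySem.List.min?_id_cons x ts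
  have hmem : ts.foldl min x ∈ x :: ts := PySem.List.min?_mem hm
  have hmin : ∀ y ∈ x :: ts, ts.foldl min x ≤ y := PySem.List.min?_isMin hm
  have hne : PySem.List.sorted (x :: ts) (fun y => y) false ≠ [] := by
    intro h
    exact List.cons_ne_nil x ts ((PySem.List.sorted_eq_nil_iff _ _ _).mp h)
  obtain ⟨h, t', hst⟩ := List.exists_cons_of_ne_nil hne
  have hhead_le : ∀ y ∈ x :: ts, h ≤ y := PySem.List.key_head_sorted_le (x :: ts) (fun y => y) hst
  have hh_mem : h ∈ x :: ts := by
    rw [← PySem.List.mem_sorted (key := fun y => y) (rev := false), hst]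
    exact List.mem_cons_self
  have : h = ts.foldl min x := le_antisymm (hhead_le _ hmem) (hmin _ hh_mem)
  rw [hst, PySem.List.pyGetD_zero, List.getD_cons_zero, this]

-- ===== VERDICT (by name: the statement is the Claim_ definition above) =====
theorem menor_string_spec : Claim_equal_menor_string := by
  intro lista _ hpre
  unfold Spec_menor_string menor_string menor_string_alt
  match lista with
  | [] => exact absurd rfl hpre
  | x :: rest =>
      simp only [List.map, menorLoopA_eq_foldl, List.foldl, head_sorted_eq_foldl_min]
      rw [min_self]
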